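-- pv_equiv track=rewrite | github.com/Soojin-Lee-01/Algorithm-Study | Python/Programmers/쿼드압축 후 개수 세기/쿼드압축 후 개수 세기.py | count
-- ===== SOURCE A (Python) =====
-- def count(gra):
--     ones = 0
--     zeros = 0
--     for row in gra:
--         ones += row.count(1)
--         zeros += row.count(0)
--     if ones == len(gra) * len(gra[0]):
--         return 1, 0
--     elif zeros == len(gra) * len(gra[0]):
--         return 0, 1
--     else:
--         return -1, -1
-- ===== SOURCE B (Python) =====
-- def count(gra):
--     total = len(gra) * len(gra[0])
--
--     def tally(rows):
--         # (ones, zeros) in rows, by divide and conquer over the row list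
--         if not rows:
--             return 0, 0
--         if len(rows) == 1:
--             o = z = 0
--             for c in rows[0]:
--                 if c == 1:
--                     o += 1
--                 elif c == 0:
--                     z += 1
--             return o, z
--         mid = len(rows) // 2
--         o1, z1 = tally(rows[:mid])
--         o2, z2 = tally(rows[mid:])
--         return o1 + o2, z1 + z2
--
--     ones, zeros = tally(gra)
--     if ones == total:
--         return 1, 0
--     if zeros == total:
--         return 0, 1
--     return -1, -1
-- ===== Notes on version B (the rewrite author's own statement) =====
-- stated objective: alternative
-- what changed: A tallies ones and zeros in one linear loop over the rows with two list.count scans per row; B computes the tallies by divide-and-conquer, recursively splitting the row list in half and adding the (ones, zeros) pairs, with a per-cell if/elif branch at the single-row base case.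
import Mathlib
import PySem

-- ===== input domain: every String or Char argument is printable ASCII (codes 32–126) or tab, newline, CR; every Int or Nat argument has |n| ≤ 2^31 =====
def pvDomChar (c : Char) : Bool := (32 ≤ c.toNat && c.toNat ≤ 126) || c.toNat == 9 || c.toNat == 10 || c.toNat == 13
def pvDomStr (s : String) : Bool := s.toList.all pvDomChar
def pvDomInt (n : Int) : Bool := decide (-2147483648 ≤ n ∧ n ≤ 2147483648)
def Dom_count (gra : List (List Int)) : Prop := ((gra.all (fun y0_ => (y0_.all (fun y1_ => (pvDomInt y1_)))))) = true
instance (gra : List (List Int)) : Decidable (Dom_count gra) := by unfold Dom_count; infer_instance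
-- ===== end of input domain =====

-- B replaces A's linear row loop with two list.count scans by a divide-and-conquer
-- recursion over the row list whose base case tallies cells with an if/elif branch
-- (objective: alternative); A = B on every non-empty grid.


-- ===== PORT A =====
-- one loop over the rows accumulating (ones, zeros) via row.count, then the comparisons
def count (gra : List (List Int)) : Int × Int :=
  let p : Int × Int :=
    gra.foldl (fun (p : Int × Int) row =>
      (p.1 + (PySem.List.count row 1 : Int), p.2 + (PySem.List.count row 0 : Int))) (0, 0)
  let total : Int := (gra.length : Int) * ((PySem.List.pyGetD gra 0 []).length : Int)
  if p.1 = total then (1, 0)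
  else if p.2 = total then (0, 1)
  else (-1, -1)

-- ===== PORT B =====
-- divide-and-conquer tally: split the row list at len//2, recurse, add the pairs;
-- a single row is tallied cell by cell with an if/elif branch.
-- rows[:mid] / rows[mid:] are ported as take/drop (exact: 0 ≤ mid ≤ len).
def tallyB (rows : List (List Int)) : Int × Int :=
  if _hn : rows = [] then (0, 0)
  else if h1 : rows.length = 1 then
    (rows.headD []).foldl
      (fun (p : Int × Int) c =>
        if c = 1 then (p.1 + 1, p.2) else if c = 0 then (p.1, p.2 + 1) else p) (0, 0)
  else
    let mid := rows.length / 2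
    let l := tallyB (rows.take mid)
    let r := tallyB (rows.drop mid)
    (l.1 + r.1, l.2 + r.2)
termination_by rows.length
decreasing_by
  · have h0 : rows.length ≠ 0 := by simpa using _hn
    simp only [List.length_take]
    omega
  · have h0 : rows.length ≠ 0 := by simpa using _hn
    simp only [List.length_drop]
    omega

def count_alt (gra : List (List Int)) : Int × Int :=
  let total : Int := (gra.length : Int) * ((PySem.List.pyGetD gra 0 []).length : Int)
  let p := tallyB gra
  if p.1 = total then (1, 0)
  else if p.2 = total then (0, 1)
  else (-1, -1)

-- ===== PRECONDITION & SPEC =====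
-- Pre_ excludes only the empty grid, on which both Pythons raise IndexError at gra[0].
def Pre_count (gra : List (List Int)) : Prop := gra ≠ []
instance (gra : List (List Int)) : Decidable (Pre_count gra) := by unfold Pre_count; infer_instance
def pvWitness_count : List (List Int) := [[1, 0], [1, 1]]
def Spec_count (gra : List (List Int)) (out : Int × Int) : Prop := out = count_alt gra
instance (gra : List (List Int)) (out : Int × Int) : Decidable (Spec_count gra out) := by unfold Spec_count; infer_instance

-- ===== CLAIM (what is proved, stated in full; the proofs are below) =====
def Claim_equal_count : Prop := ∀ (gra : List (List Int)), Dom_count gra → Pre_count gra → Spec_count gra (count gra)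

-- ===== LEMMAS AND PROOFS =====

-- B's base-case cell loop tallies exactly (count row 1, count row 0).
theorem rowfold (row : List Int) (a b : Int) :
    row.foldl
      (fun (p : Int × Int) c =>
        if c = 1 then (p.1 + 1, p.2) else if c = 0 then (p.1, p.2 + 1) else p) (a, b)
      = (a + (PySem.List.count row 1 : Int), b + (PySem.List.count row 0 : Int)) := by
  induction row generalizing a b with
  | nil => simp [PySem.List.count]
  | cons c t ih =>
      by_cases h1 : c = 1
      all_goals by_cases h0 : c = 0
      all_goals
        simp only [List.foldl_cons, h1, h0, if_true, if_false, ih,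
          PySem.List.count, List.count_cons, Prod.ext_iff]
      all_goals simp [h1, h0]
      all_goals omega

-- B's divide-and-conquer tally equals the summed per-row counts.
theorem tallyB_eq (rows : List (List Int)) :
    tallyB rows
      = ((rows.map (fun row => (PySem.List.count row 1 : Int))).sum,
         (rows.map (fun row => (PySem.List.count row 0 : Int))).sum) := by
  fun_induction tallyB rows with
  | case1 => simp
  | case2 rows h h1 =>
      obtain ⟨r, rfl⟩ := List.length_eq_one_iff.mp h1
      rw [rowfold]
      simp
  | case3 rows h h1 mid l r ihl ihr =>
      have key : ∀ f : List Int → Int,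
          ((List.take mid rows).map f).sum + ((List.drop mid rows).map f).sum
            = (rows.map f).sum := by
        intro f
        conv_rhs => rw [← List.take_append_drop mid rows]
        simp
      simp only [l, r, ihl, ihr, Prod.ext_iff]
      exact ⟨key _, key _⟩
-- A's pair-accumulating loop computes the same two sums.
theorem pairfold (gra : List (List Int)) (a b : Int) :
    gra.foldl (fun (p : Int × Int) row =>
        (p.1 + (PySem.List.count row 1 : Int), p.2 + (PySem.List.count row 0 : Int))) (a, b)
      = (a + (gra.map (fun row => (PySem.List.count row 1 : Int))).sum,
         b + (gra.map (fun row => (PySem.List.count row 0 : Int))).sum) := by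
  induction gra generalizing a b with
  | nil => simp
  | cons r t ih =>
      rw [List.foldl_cons, ih]
      simp [add_assoc]

-- ===== VERDICT (by name: the statement is the Claim_ definition above) =====
theorem count_spec : Claim_equal_count := by
  intro gra _ _
  unfold Spec_count count count_alt
  simp only [tallyB_eq, pairfold, zero_add]
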